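-- pv_equiv track=rewrite | github.com/anujkhare/algorithms | solutions/Dynamic Programming/WaysToColor3NBoard.py | solve
-- ===== SOURCE A (Python) =====
-- def solve(A):
--     if A == 0: return 0
--     if A == 1: return 36
--
--     dp2 = 12
--     dp3 = 24
--     for ix in range(1, A):
--         ndp2 = dp2 * 7 + dp3 * 5
--         ndp3 = dp2 * 10 + dp3 * 11
--         dp2, dp3 = ndp2, ndp3
--     return (dp2 + dp3) % 1000000007
-- ===== SOURCE B (Python) =====
-- P = 1000000007
--
-- def _mul(X, Y):
--     a, b, c, d = X
--     e, f, g, h = Y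
--     return ((a * e + b * g) % P, (a * f + b * h) % P,
--             (c * e + d * g) % P, (c * f + d * h) % P)
--
-- def solve(A):
--     if A == 0:
--         return 0
--     e = A - 1
--     if e < 0:
--         e = 0
--     R = (1, 0, 0, 1)
--     M = (7, 5, 10, 11)
--     while e > 0:
--         if e & 1:
--             R = _mul(R, M)
--         M = _mul(M, M)
--         e >>= 1
--     a, b, c, d = R
--     return ((a + c) * 12 + (b + d) * 24) % P
-- ===== Notes on version B (the rewrite author's own statement) =====
-- stated objective: faster
-- what changed: Replaces the O(A) linear-recurrence loop on ever-growing bignums (mod taken only at the end) with 2x2 matrix exponentiation by squaring, fully modular throughout.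
import Mathlib
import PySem

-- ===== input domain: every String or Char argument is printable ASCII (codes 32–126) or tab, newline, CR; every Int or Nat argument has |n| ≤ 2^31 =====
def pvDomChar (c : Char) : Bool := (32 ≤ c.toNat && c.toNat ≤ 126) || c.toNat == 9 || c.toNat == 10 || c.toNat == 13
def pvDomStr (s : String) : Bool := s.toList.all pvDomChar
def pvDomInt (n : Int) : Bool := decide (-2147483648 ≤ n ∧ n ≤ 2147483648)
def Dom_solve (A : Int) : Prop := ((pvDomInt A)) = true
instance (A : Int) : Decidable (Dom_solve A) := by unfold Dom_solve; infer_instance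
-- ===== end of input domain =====

-- B replaces A's O(A) loop on ever-growing bignums with O(log A) modular 2x2 matrix exponentiation (faster).

-- ===== PORT A =====
def solve (A : Int) : Int :=
  if A = 0 then 0
  else if A = 1 then 36
  else
    let r := (PySem.List.pyRange 1 A 1).foldl
      (fun (s : Int × Int) _ => (s.1 * 7 + s.2 * 5, s.1 * 10 + s.2 * 11)) (12, 24)
    PySem.Int.mod (r.1 + r.2) 1000000007

-- ===== PORT B =====
-- 2x2 matrices as 4-tuples (a, b, c, d) = [[a,b],[c,d]]; _mul from Source B
def pvMulQ (X Y : Int × Int × Int × Int) : Int × Int × Int × Int :=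
  match X, Y with
  | (a, b, c, d), (e, f, g, h) =>
    (PySem.Int.mod (a * e + b * g) 1000000007, PySem.Int.mod (a * f + b * h) 1000000007,
     PySem.Int.mod (c * e + d * g) 1000000007, PySem.Int.mod (c * f + d * h) 1000000007)

-- the 'while e > 0' squaring loop of Source B, on the (nonnegative) exponent as a Nat
def pvPowLoop (e : Nat) (R M : Int × Int × Int × Int) : Int × Int × Int × Int :=
  if h : e = 0 then R
  else pvPowLoop (e / 2) (if e % 2 = 1 then pvMulQ R M else R) (pvMulQ M M)
termination_by e
decreasing_by exact Nat.div_lt_self (Nat.pos_of_ne_zero h) (by norm_num)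

def solve_alt (A : Int) : Int :=
  if A = 0 then 0
  else
    let e : Int := A - 1
    let e := if e < 0 then 0 else e
    let q := pvPowLoop e.toNat (1, 0, 0, 1) (7, 5, 10, 11)  -- q = (a, b, c, d)
    PySem.Int.mod ((q.1 + q.2.2.1) * 12 + (q.2.1 + q.2.2.2) * 24) 1000000007

-- ===== PRECONDITION & SPEC =====
def Spec_solve (A : Int) (out : Int) : Prop := out = solve_alt A
instance (A : Int) (out : Int) : Decidable (Spec_solve A out) := by unfold Spec_solve; infer_instance

-- ===== CLAIM (what is proved, stated in full; the proofs are below) =====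
def Claim_equal_solve : Prop := ∀ (A : Int), Dom_solve A → Spec_solve A (solve A)

-- ===== LEMMAS AND PROOFS =====

-- ZMod-side mirrors of the computations
def pvCQ (X : Int × Int × Int × Int) : ZMod 1000000007 × ZMod 1000000007 × ZMod 1000000007 × ZMod 1000000007 :=
  ((X.1 : ZMod 1000000007), (X.2.1 : ZMod 1000000007), (X.2.2.1 : ZMod 1000000007), (X.2.2.2 : ZMod 1000000007))

def pvMulZ (X Y : ZMod 1000000007 × ZMod 1000000007 × ZMod 1000000007 × ZMod 1000000007) : ZMod 1000000007 × ZMod 1000000007 × ZMod 1000000007 × ZMod 1000000007 :=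
  (X.1 * Y.1 + X.2.1 * Y.2.2.1, X.1 * Y.2.1 + X.2.1 * Y.2.2.2,
   X.2.2.1 * Y.1 + X.2.2.2 * Y.2.2.1, X.2.2.1 * Y.2.1 + X.2.2.2 * Y.2.2.2)

def pvQPow (M : ZMod 1000000007 × ZMod 1000000007 × ZMod 1000000007 × ZMod 1000000007) : Nat → ZMod 1000000007 × ZMod 1000000007 × ZMod 1000000007 × ZMod 1000000007
  | 0 => (1, 0, 0, 1)
  | n + 1 => pvMulZ M (pvQPow M n)

def pvAv (X : ZMod 1000000007 × ZMod 1000000007 × ZMod 1000000007 × ZMod 1000000007) (v : ZMod 1000000007 × ZMod 1000000007) : ZMod 1000000007 × ZMod 1000000007 :=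
  (X.1 * v.1 + X.2.1 * v.2, X.2.2.1 * v.1 + X.2.2.2 * v.2)

def pvStepZ (v : ZMod 1000000007 × ZMod 1000000007) : ZMod 1000000007 × ZMod 1000000007 := (v.1 * 7 + v.2 * 5, v.1 * 10 + v.2 * 11)

def pvStepI (s : Int × Int) : Int × Int := (s.1 * 7 + s.2 * 5, s.1 * 10 + s.2 * 11)

theorem pvMod_cast (x : Int) :
    ((PySem.Int.mod x 1000000007 : Int) : ZMod 1000000007) = (x : ZMod 1000000007) := by
  rw [PySem.Int.mod_eq_emod_of_pos (by norm_num : (0:Int) < 1000000007)]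
  exact_mod_cast ZMod.intCast_mod x 1000000007

theorem pvCQ_mul (X Y : Int × Int × Int × Int) : pvCQ (pvMulQ X Y) = pvMulZ (pvCQ X) (pvCQ Y) := by
  obtain ⟨a, b, c, d⟩ := X; obtain ⟨e, f, g, h⟩ := Y
  simp only [pvMulQ, pvCQ, pvMulZ]
  refine Prod.ext ?_ (Prod.ext ?_ (Prod.ext ?_ ?_)) <;> simp only [pvMod_cast]
  all_goals (push_cast; ring)

theorem pvMulZ_assoc (X Y Z : ZMod 1000000007 × ZMod 1000000007 × ZMod 1000000007 × ZMod 1000000007) :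
    pvMulZ (pvMulZ X Y) Z = pvMulZ X (pvMulZ Y Z) := by
  simp only [pvMulZ]
  refine Prod.ext ?_ (Prod.ext ?_ (Prod.ext ?_ ?_)) <;> ring

theorem pvMulZ_one (X : ZMod 1000000007 × ZMod 1000000007 × ZMod 1000000007 × ZMod 1000000007) : pvMulZ (1, 0, 0, 1) X = X := by
  simp only [pvMulZ]
  refine Prod.ext ?_ (Prod.ext ?_ (Prod.ext ?_ ?_)) <;> ring

theorem pvMulZ_one_right (X : ZMod 1000000007 × ZMod 1000000007 × ZMod 1000000007 × ZMod 1000000007) : pvMulZ X (1, 0, 0, 1) = X := by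
  simp only [pvMulZ]
  refine Prod.ext ?_ (Prod.ext ?_ (Prod.ext ?_ ?_)) <;> ring

theorem pvQPow_sq (M : ZMod 1000000007 × ZMod 1000000007 × ZMod 1000000007 × ZMod 1000000007) (k : Nat) :
    pvQPow (pvMulZ M M) k = pvQPow M (2 * k) := by
  induction k with
  | zero => rfl
  | succ n ih =>
    have : 2 * (n + 1) = (2 * n) + 1 + 1 := by omega
    rw [this]
    simp only [pvQPow, ih, pvMulZ_assoc]

theorem pvQPow_succ (M : ZMod 1000000007 × ZMod 1000000007 × ZMod 1000000007 × ZMod 1000000007) (n : Nat) :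
    pvQPow M (n + 1) = pvMulZ M (pvQPow M n) := rfl

theorem pvPowLoop_cast (e : Nat) : ∀ (R M : Int × Int × Int × Int),
    pvCQ (pvPowLoop e R M) = pvMulZ (pvCQ R) (pvQPow (pvCQ M) e) := by
  induction e using Nat.strong_induction_on with
  | _ e ih =>
    intro R M
    rw [pvPowLoop]
    by_cases h : e = 0
    · subst h
      rw [dif_pos rfl, pvQPow]
      exact (pvMulZ_one_right (pvCQ R)).symm
    · rw [dif_neg h]
      rw [ih (e / 2) (Nat.div_lt_self (Nat.pos_of_ne_zero h) (by norm_num))]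
      rw [pvCQ_mul, pvQPow_sq]
      by_cases hodd : e % 2 = 1
      · rw [if_pos hodd, pvCQ_mul, pvMulZ_assoc, ← pvQPow_succ]
        have he : 2 * (e / 2) + 1 = e := by omega
        rw [he]
      · rw [if_neg hodd]
        have he : 2 * (e / 2) = e := by omega
        rw [he]

theorem pvAv_mul (X Y : ZMod 1000000007 × ZMod 1000000007 × ZMod 1000000007 × ZMod 1000000007) (v : ZMod 1000000007 × ZMod 1000000007) :
    pvAv (pvMulZ X Y) v = pvAv X (pvAv Y v) := by
  simp only [pvMulZ, pvAv]
  refine Prod.ext ?_ ?_ <;> ring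

theorem pvAv_qpow (X : ZMod 1000000007 × ZMod 1000000007 × ZMod 1000000007 × ZMod 1000000007) (n : Nat) (v : ZMod 1000000007 × ZMod 1000000007) :
    pvAv (pvQPow X n) v = (pvAv X)^[n] v := by
  induction n with
  | zero => simp [pvQPow, pvAv]
  | succ n ih =>
    rw [pvQPow, pvAv_mul, ih, Function.iterate_succ_apply']

theorem pvAv_M0 : pvAv (pvCQ (7, 5, 10, 11)) = pvStepZ := by
  funext v
  simp only [pvAv, pvCQ, pvStepZ]
  refine Prod.ext ?_ ?_ <;> push_cast <;> ring

theorem pvFoldl_const {α β : Type} (f : α → α) (l : List β) (init : α) :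
    l.foldl (fun s _ => f s) init = f^[l.length] init := by
  induction l generalizing init with
  | nil => rfl
  | cons x xs ih => simp [List.foldl, ih, Function.iterate_succ_apply]

theorem pvStep_cast (n : Nat) (v : Int × Int) :
    (((pvStepI^[n] v).1 : ZMod 1000000007), ((pvStepI^[n] v).2 : ZMod 1000000007))
      = pvStepZ^[n] ((v.1 : ZMod 1000000007), (v.2 : ZMod 1000000007)) := by
  induction n generalizing v with
  | zero => rfl
  | succ n ih =>
    rw [Function.iterate_succ_apply, Function.iterate_succ_apply, ih (pvStepI v)]
    congr 1
    simp only [pvStepI, pvStepZ]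
    refine Prod.ext ?_ ?_ <;> (push_cast; ring)

theorem pvMod_eq_of_cast_eq (x y : Int)
    (h : (x : ZMod 1000000007) = (y : ZMod 1000000007)) :
    PySem.Int.mod x 1000000007 = PySem.Int.mod y 1000000007 := by
  rw [PySem.Int.mod_eq_emod_of_pos (by norm_num : (0:Int) < 1000000007),
      PySem.Int.mod_eq_emod_of_pos (by norm_num : (0:Int) < 1000000007)]
  have := (ZMod.intCast_eq_intCast_iff' x y 1000000007).mp h
  exact_mod_cast this

theorem pvPowLoop_zero (R M : Int × Int × Int × Int) : pvPowLoop 0 R M = R := by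
  rw [pvPowLoop]
  simp

theorem pvA_val (n : Nat) :
    (((pvStepI^[n] ((12:Int), (24:Int))).1 + (pvStepI^[n] ((12:Int), (24:Int))).2 : Int) : ZMod 1000000007)
      = (pvStepZ^[n] (12, 24)).1 + (pvStepZ^[n] (12, 24)).2 := by
  have h := pvStep_cast n ((12:Int), (24:Int))
  push_cast at h
  have h1 := congrArg Prod.fst h
  have h2 := congrArg Prod.snd h
  dsimp only at h1 h2
  push_cast
  rw [h1, h2]

theorem pvB_val (n : Nat) :
    ((((pvPowLoop n (1, 0, 0, 1) (7, 5, 10, 11)).1 + (pvPowLoop n (1, 0, 0, 1) (7, 5, 10, 11)).2.2.1) * 12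
      + ((pvPowLoop n (1, 0, 0, 1) (7, 5, 10, 11)).2.1 + (pvPowLoop n (1, 0, 0, 1) (7, 5, 10, 11)).2.2.2) * 24 : Int)
      : ZMod 1000000007)
    = (pvStepZ^[n] (12, 24)).1 + (pvStepZ^[n] (12, 24)).2 := by
  have hq : pvCQ (pvPowLoop n (1, 0, 0, 1) (7, 5, 10, 11)) = pvQPow (pvCQ (7, 5, 10, 11)) n := by
    rw [pvPowLoop_cast]
    have h1 : pvCQ ((1:Int), (0:Int), (0:Int), (1:Int)) = ((1:ZMod 1000000007), 0, 0, 1) := by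
      simp [pvCQ]
    rw [h1, pvMulZ_one]
  have hv : pvAv (pvCQ (pvPowLoop n (1, 0, 0, 1) (7, 5, 10, 11))) (12, 24) = pvStepZ^[n] (12, 24) := by
    rw [hq, pvAv_qpow, pvAv_M0]
  have h1 := congrArg Prod.fst hv
  have h2 := congrArg Prod.snd hv
  simp only [pvAv, pvCQ] at h1 h2
  push_cast
  rw [← h1, ← h2]
  ring

-- ===== VERDICT (by name: the statement is the Claim_ definition above) =====
theorem solve_spec : Claim_equal_solve := by
  intro A _
  unfold Spec_solve
  by_cases h0 : A = 0
  · simp [solve, solve_alt, h0]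
  by_cases h1 : A = 1
  · subst h1
    have hb : solve_alt 1 = 36 := by
      simp only [solve_alt]
      norm_num [pvPowLoop_zero]
    simp [solve, hb]
  simp only [solve, solve_alt, if_neg h0, if_neg h1]
  have hfold : (PySem.List.pyRange 1 A 1).foldl
      (fun (s : Int × Int) _ => (s.1 * 7 + s.2 * 5, s.1 * 10 + s.2 * 11)) ((12:Int), (24:Int))
      = pvStepI^[(A - 1).toNat] ((12:Int), (24:Int)) := by
    have h := pvFoldl_const pvStepI (PySem.List.pyRange 1 A 1) ((12:Int), (24:Int))
    rw [PySem.List.length_pyRange_one] at h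
    exact h
  have hexp : (if A - 1 < 0 then (0:Int) else A - 1).toNat = (A - 1).toNat := by
    split_ifs with h
    · omega
    · rfl
  rw [hfold, hexp]
  exact pvMod_eq_of_cast_eq _ _ (by rw [pvA_val, pvB_val])
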